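-- pv_equiv track=rewrite | github.com/Dixith-ai/Learning-Python | advanced/find_permutations_string.py | find_permutations_optimized
-- ===== SOURCE A (Python) =====
-- def find_permutations_optimized(s):
--     def backtrack(current):
--         if len(current) == len(s):
--             result.append(current[:])
--             return
--
--         for i in range(len(s)):
--             if s[i] not in current:
--                 current.append(s[i])
--                 backtrack(current)
--                 current.pop()
--
--     result = []
--     backtrack([])
--     return result
-- ===== SOURCE B (Python) =====
-- def find_permutations_optimized(s):
--     result = []
--     stack = [[]]
--     while stack:
--         current = stack.pop()
--         if len(current) == len(s):
--             result.append(current)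
--         else:
--             for i in reversed(range(len(s))):
--                 if s[i] not in current:
--                     stack.append(current + [s[i]])
--     return result
-- ===== Notes on version B (the rewrite author's own statement) =====
-- stated objective: alternative
-- what changed: Replaces A's recursive backtracking with mutable current/result by an iterative explicit stack of immutable partial permutations, popping a partial and pushing its eligible extensions in reversed index order so leaves are emitted in the same preorder.
import Mathlib
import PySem

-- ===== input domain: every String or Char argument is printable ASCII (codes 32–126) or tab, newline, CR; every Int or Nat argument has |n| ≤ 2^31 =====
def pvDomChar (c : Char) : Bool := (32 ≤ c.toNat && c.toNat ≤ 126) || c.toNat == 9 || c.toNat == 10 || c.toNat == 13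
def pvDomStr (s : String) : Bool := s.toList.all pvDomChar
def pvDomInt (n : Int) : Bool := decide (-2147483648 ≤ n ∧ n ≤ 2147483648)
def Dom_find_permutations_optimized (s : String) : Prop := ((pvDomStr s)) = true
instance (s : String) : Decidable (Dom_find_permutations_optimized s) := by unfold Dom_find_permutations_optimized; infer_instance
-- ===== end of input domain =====

-- B replaces A's recursive backtracking by an explicit stack of partial permutations
-- (children pushed in reversed index order so pop order matches A's preorder): an
-- alternative iterative decomposition, same asymptotic cost.

-- ===== PORT A =====
-- backtrack(current): the fuel argument is len(s) - len(current) at every real call,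
-- so the fuel-0 'else' branch ([]) is unreachable; it only makes the recursion total.
def pvBtA (cs : List String) : Nat → List String → List (List String)
  | 0, current => if current.length = cs.length then [current] else []
  | f+1, current =>
    if current.length = cs.length then [current]
    else cs.foldl (fun acc c => if c ∈ current then acc else acc ++ pvBtA cs f (current ++ [c])) []

def find_permutations_optimized (s : String) : List (List String) :=
  let cs := s.toList.map (fun c => String.mk [c])   -- s[i] is the 1-char string
  pvBtA cs cs.length []

-- ===== PORT B =====
-- fuel bound for the while loop: pvBnd n f ≥ number of pops the loop performs
def pvBnd (n : Nat) : Nat → Nat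
  | 0 => 1
  | f+1 => 1 + n * pvBnd n f

-- the while loop: stack head = top of Python's stack; pushing current+[s[i]] for
-- i in reversed(range(len(s))) and popping from the end processes the eligible
-- children in index order, i.e. prepends (filter).map (current ++ [·]) to the stack.
def pvRunB (cs : List String) : Nat → List (List String) → List (List String) → List (List String)
  | 0, _, result => result
  | _+1, [], result => result
  | f+1, current :: rest, result =>
    if current.length = cs.length then pvRunB cs f rest (result ++ [current])
    else pvRunB cs f (((cs.filter (fun c => decide (c ∉ current))).map (fun c => current ++ [c])) ++ rest) result

def find_permutations_optimized_alt (s : String) : List (List String) :=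
  let cs := s.toList.map (fun c => String.mk [c])
  pvRunB cs (pvBnd cs.length cs.length) [[]] []

-- ===== PRECONDITION & SPEC =====
def Spec_find_permutations_optimized (s : String) (out : List (List String)) : Prop := out = find_permutations_optimized_alt s
instance (s : String) (out : List (List String)) : Decidable (Spec_find_permutations_optimized s out) := by unfold Spec_find_permutations_optimized; infer_instance

-- ===== CLAIM (what is proved, stated in full; the proofs are below) =====
def Claim_equal_find_permutations_optimized : Prop := ∀ (s : String), Dom_find_permutations_optimized s → Spec_find_permutations_optimized s (find_permutations_optimized s)

-- ===== LEMMAS AND PROOFS =====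

-- size of the recursion tree rooted at `current` (proof-side mirror of pvBtA)
def pvNodes (cs : List String) : Nat → List String → Nat
  | 0, _ => 1
  | f+1, current =>
    if current.length = cs.length then 1
    else 1 + cs.foldl (fun acc c => if c ∈ current then acc else acc + pvNodes cs f (current ++ [c])) 0

lemma pvFoldl_mem_append (l : List String) (cur : List String) (g : String → List (List String))
    (acc : List (List String)) :
    l.foldl (fun acc c => if c ∈ cur then acc else acc ++ g c) acc
      = acc ++ (l.filter (fun c => decide (c ∉ cur))).flatMap g := by
  induction l generalizing acc with
  | nil => simp
  | cons h t ih =>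
    by_cases hm : h ∈ cur <;> simp [hm, ih]

lemma pvFoldl_mem_add (l : List String) (cur : List String) (g : String → Nat) (acc : Nat) :
    l.foldl (fun acc c => if c ∈ cur then acc else acc + g c) acc
      = acc + ((l.filter (fun c => decide (c ∉ cur))).map g).sum := by
  induction l generalizing acc with
  | nil => simp
  | cons h t ih =>
    by_cases hm : h ∈ cur <;> simp [hm, ih] <;> try omega

lemma pvNodes_pos (cs : List String) (f : Nat) (current : List String) :
    1 ≤ pvNodes cs f current := by
  cases f with
  | zero => simp [pvNodes]
  | succ f =>
    simp only [pvNodes]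
    split
    · exact le_refl 1
    · exact Nat.le_add_right 1 _

lemma pvNodes_le (cs : List String) (f : Nat) : ∀ current, pvNodes cs f current ≤ pvBnd cs.length f := by
  induction f with
  | zero => intro current; simp [pvNodes, pvBnd]
  | succ f ih =>
    intro current
    simp only [pvNodes, pvBnd]
    split
    · exact Nat.le_add_right 1 _
    · rw [pvFoldl_mem_add]
      have h1 : (((cs.filter (fun c => decide (c ∉ current))).map
          (fun c => pvNodes cs f (current ++ [c]))).sum)
          ≤ ((cs.filter (fun c => decide (c ∉ current))).map
          (fun c => pvNodes cs f (current ++ [c]))).length * pvBnd cs.length f := by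
        have := List.sum_le_card_nsmul
          ((cs.filter (fun c => decide (c ∉ current))).map (fun c => pvNodes cs f (current ++ [c])))
          (pvBnd cs.length f) ?_
        · simpa [smul_eq_mul] using this
        · intro x hx
          obtain ⟨c, _, rfl⟩ := List.mem_map.mp hx
          exact ih _
      have h2 : ((cs.filter (fun c => decide (c ∉ current))).map
          (fun c => pvNodes cs f (current ++ [c]))).length ≤ cs.length := by
        simpa using List.length_filter_le _ cs
      have h3 := Nat.mul_le_mul_right (pvBnd cs.length f) h2
      omega

-- main invariant: with enough fuel, the stack loop emits, in order, the preorder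
-- leaves of each stacked partial permutation's recursion tree.
lemma pvRun_eq (cs : List String) (f : Nat) : ∀ (stack : List (List String)) (result : List (List String)),
    (∀ c ∈ stack, c.length ≤ cs.length) →
    (stack.map (fun c => pvNodes cs (cs.length - c.length) c)).sum ≤ f →
    pvRunB cs f stack result
      = result ++ stack.flatMap (fun c => pvBtA cs (cs.length - c.length) c) := by
  induction f using Nat.strong_induction_on with
  | _ f ih =>
  intro stack result hlen hfuel
  cases stack with
  | nil => cases f <;> simp [pvRunB]
  | cons current rest =>
    cases f with
    | zero =>
      exfalso
      have h1 := pvNodes_pos cs (cs.length - current.length) current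
      simp only [List.map_cons, List.sum_cons, Nat.le_zero] at hfuel
      omega
    | succ f =>
      by_cases hc : current.length = cs.length
      · -- leaf: emit current
        have hstep : pvRunB cs (f+1) (current :: rest) result = pvRunB cs f rest (result ++ [current]) := by
          simp only [pvRunB]; rw [if_pos hc]
        rw [hstep, ih f (Nat.lt_succ_self f) rest (result ++ [current])
            (fun c hc' => hlen c (List.mem_cons_of_mem _ hc'))
            (by simp only [List.map_cons, List.sum_cons] at hfuel
                have := pvNodes_pos cs (cs.length - current.length) current
                omega)]
        have hbt : pvBtA cs (cs.length - current.length) current = [current] := by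
          rw [hc, Nat.sub_self]; simp [pvBtA, hc]
        simp [hbt]
      · -- interior node: expand children
        have hlt : current.length < cs.length :=
          lt_of_le_of_ne (hlen current (List.mem_cons_self)) hc
        have hk : cs.length - current.length = (cs.length - (current.length + 1)) + 1 := by omega
        have hstep : pvRunB cs (f+1) (current :: rest) result
            = pvRunB cs f (((cs.filter (fun c => decide (c ∉ current))).map (fun c => current ++ [c])) ++ rest) result := by
          simp [pvRunB, hc]
        -- the per-child fuel is uniform on children: they all have length current.length + 1
        have hmapchild : ∀ (g : Nat → List String → Nat),
            (((cs.filter (fun c => decide (c ∉ current))).map (fun c => current ++ [c])).map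
              (fun c' => g (cs.length - c'.length) c')).sum
            = ((cs.filter (fun c => decide (c ∉ current))).map
              (fun c => g (cs.length - (current.length + 1)) (current ++ [c]))).sum := by
          intro g
          rw [List.map_map]
          congr 1
          apply List.map_congr_left
          intro c _
          simp
        have hnodes : pvNodes cs (cs.length - current.length) current
            = 1 + ((cs.filter (fun c => decide (c ∉ current))).map
              (fun c => pvNodes cs (cs.length - (current.length + 1)) (current ++ [c]))).sum := by
          rw [hk]
          simp only [pvNodes, hc, if_false]
          rw [pvFoldl_mem_add]
          omega
        rw [hstep, ih f (Nat.lt_succ_self f) _ result ?_ ?_]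
        · -- equality of the emitted lists
          have hbt : pvBtA cs (cs.length - current.length) current
              = (cs.filter (fun c => decide (c ∉ current))).flatMap
                (fun c => pvBtA cs (cs.length - (current.length + 1)) (current ++ [c])) := by
            rw [hk]
            simp only [pvBtA, hc, if_false]
            rw [pvFoldl_mem_append]
            simp
          rw [List.flatMap_append, List.flatMap_cons, hbt, List.flatMap_map]
          have heq : (fun c => pvBtA cs (cs.length - (current ++ [c]).length) (current ++ [c]))
              = (fun c => pvBtA cs (cs.length - (current.length + 1)) (current ++ [c])) := by
            funext c; simp
          simp only [heq]
        · -- lengths stay ≤ n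
          intro c' hc'
          rcases List.mem_append.mp hc' with h | h
          · obtain ⟨c, _, rfl⟩ := List.mem_map.mp h
            simp only [List.length_append, List.length_cons, List.length_nil]
            omega
          · exact hlen c' (List.mem_cons_of_mem _ h)
        · -- fuel accounting
          simp only [List.map_append, List.sum_append]
          rw [hmapchild (fun k c => pvNodes cs k c)]
          simp only [List.map_cons, List.sum_cons] at hfuel
          rw [hnodes] at hfuel
          omega

-- ===== VERDICT (by name: the statement is the Claim_ definition above) =====
theorem find_permutations_optimized_spec : Claim_equal_find_permutations_optimized := by
  intro s _
  unfold Spec_find_permutations_optimized find_permutations_optimized find_permutations_optimized_alt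
  set cs := s.toList.map (fun c => String.mk [c]) with hcs
  rw [pvRun_eq cs (pvBnd cs.length cs.length) [[]] []
      (by intro c hc; simp at hc; simp [hc])
      (by simpa using pvNodes_le cs cs.length [])]
  simp
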